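-- pv_equiv track=rewrite | github.com/jayantsolanki/EPIJudgePython | epi_judge_python/16-05-is_string_in_matrix.py | is_pattern_contained_in_grid_ori
-- ===== SOURCE A (Python) =====
-- import functools
-- from typing import List
--
-- def is_pattern_contained_in_grid_ori(grid: List[List[int]],
--                                  pattern: List[int]) -> bool:
--     @functools.lru_cache(None)
--     def is_pattern_suffix_contained_starting_at_xy(x, y, offset):
--         if len(pattern) == offset:
--             # Nothing left to complete.
--             return True
--
--         # Early return if (x, y) lies outside the grid or the character
--         # does not match or we have already tried this combination.
--         if (not (0 <= x < len(grid) and 0 <= y < len(grid[x]))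
--                 or grid[x][y] != pattern[offset]):
--             return False
--
--         return any(
--             is_pattern_suffix_contained_starting_at_xy(*next_xy, offset + 1)
--             for next_xy in ((x - 1, y), (x + 1, y), (x, y - 1), (x, y + 1)))
--
--     return any(
--         is_pattern_suffix_contained_starting_at_xy(i, j, offset=0)
--         for i in range(len(grid)) for j in range(len(grid[i])))
-- ===== SOURCE B (Python) =====
-- def is_pattern_contained_in_grid_ori(grid, pattern):
--     # Reverse dynamic programming over pattern suffixes: frontier = set of cells
--     # where the current suffix of the pattern can start (re-visiting cells is allowed,
--     # exactly as in the memoized DFS).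
--     if not pattern:
--         return any(len(row) > 0 for row in grid)
--     rev = pattern[::-1]
--     frontier = {(i, j) for i, row in enumerate(grid) for j, v in enumerate(row)
--                 if v == rev[0]}
--     for ch in rev[1:]:
--         if not frontier:
--             return False
--         frontier = {(i, j) for i, row in enumerate(grid) for j, v in enumerate(row)
--                     if v == ch and ((i - 1, j) in frontier or (i + 1, j) in frontier
--                                     or (i, j - 1) in frontier or (i, j + 1) in frontier)}
--     return len(frontier) > 0
-- ===== Notes on version B (the rewrite author's own statement) =====
-- stated objective: alternative
-- what changed: Replaces the memoized recursive DFS over (cell, offset) states by an iterative set-based dynamic programming pass over the reversed pattern: the frontier set holds exactly the cells where the current pattern suffix can start, with an early exit when it empties.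
import Mathlib
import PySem

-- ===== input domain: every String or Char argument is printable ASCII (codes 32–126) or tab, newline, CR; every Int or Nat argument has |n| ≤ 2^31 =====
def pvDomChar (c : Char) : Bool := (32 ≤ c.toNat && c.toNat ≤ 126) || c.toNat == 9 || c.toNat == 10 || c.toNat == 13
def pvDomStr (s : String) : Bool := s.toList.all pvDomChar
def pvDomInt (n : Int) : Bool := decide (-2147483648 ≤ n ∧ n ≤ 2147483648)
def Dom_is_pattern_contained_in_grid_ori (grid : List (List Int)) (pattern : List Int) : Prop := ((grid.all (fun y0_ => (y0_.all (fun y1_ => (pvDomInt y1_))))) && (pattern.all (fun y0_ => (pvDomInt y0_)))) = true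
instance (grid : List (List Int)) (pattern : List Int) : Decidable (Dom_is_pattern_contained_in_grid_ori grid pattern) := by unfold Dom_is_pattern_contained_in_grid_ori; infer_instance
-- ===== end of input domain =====

-- B replaces A's memoized recursive DFS by an iterative frontier-set DP over the
-- reversed pattern (alternative decomposition; same asymptotic cost).

-- ===== PORT A =====
-- bounds test `0 <= x < len(grid) and 0 <= y < len(grid[x])`; grid[x] / grid[x][y] are
-- only read under this guard, so the pyGetD defaults below are never the value used
def pvInb (grid : List (List Int)) (x y : Int) : Bool :=
  decide (0 ≤ x) && decide (x < (grid.length : Int)) && decide (0 ≤ y) &&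
    decide (y < ((PySem.List.pyGetD grid x []).length : Int))

-- grid[x][y], read only when pvInb holds
def pvCell (grid : List (List Int)) (x y : Int) : Int :=
  PySem.List.pyGetD (PySem.List.pyGetD grid x []) y 0

-- is_pattern_suffix_contained_starting_at_xy; the suffix pattern[offset:] is the list
-- argument (offset == len(pattern) ↔ []); lru_cache is pure memoization, no semantic effect
def pvDfs (grid : List (List Int)) : Int → Int → List Int → Bool
  | _, _, [] => true
  | x, y, p :: rest =>
    if pvInb grid x y && (pvCell grid x y == p) then
      pvDfs grid (x - 1) y rest || pvDfs grid (x + 1) y rest ||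
        pvDfs grid x (y - 1) rest || pvDfs grid x (y + 1) rest
    else false

def is_pattern_contained_in_grid_ori (grid : List (List Int)) (pattern : List Int) : Bool :=
  (PySem.List.pyRange 0 (grid.length : Int) 1).any (fun i =>
    (PySem.List.pyRange 0 ((PySem.List.pyGetD grid i []).length : Int) 1).any (fun j =>
      pvDfs grid i j pattern))

-- ===== PORT B =====
-- the set comprehension {(i,j) for i,row in enumerate(grid) for j,v in enumerate(row) if cond}
def pvCellsIf (grid : List (List Int)) (cond : Int → Int → Int → Bool) : PySem.Set (Int × Int) :=
  PySem.Set.ofList ((PySem.List.enumerate grid).flatMap (fun ir =>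
    (PySem.List.enumerate ir.2).filterMap (fun jv =>
      if cond ir.1 jv.1 jv.2 then some (ir.1, jv.1) else none)))

-- (i-1,j) in frontier or (i+1,j) in frontier or (i,j-1) in frontier or (i,j+1) in frontier
def pvNbr (F : PySem.Set (Int × Int)) (i j : Int) : Bool :=
  F.contains (i - 1, j) || F.contains (i + 1, j) || F.contains (i, j - 1) || F.contains (i, j + 1)

-- the `for ch in rev[1:]` loop with its early `return False`, then `len(frontier) > 0`
def pvLoop (grid : List (List Int)) : PySem.Set (Int × Int) → List Int → Bool
  | F, [] => decide (0 < F.length)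
  | F, ch :: rest =>
    if F.isEmpty then false
    else pvLoop grid (pvCellsIf grid (fun i j v => (v == ch) && pvNbr F i j)) rest

def is_pattern_contained_in_grid_ori_alt (grid : List (List Int)) (pattern : List Int) : Bool :=
  match pattern.reverse with  -- rev = pattern[::-1]
  | [] => grid.any (fun row => decide (0 < row.length))
  | ch :: rest => pvLoop grid (pvCellsIf grid (fun _ _ v => v == ch)) rest

-- ===== PRECONDITION & SPEC =====
def Spec_is_pattern_contained_in_grid_ori (grid : List (List Int)) (pattern : List Int) (out : Bool) : Prop := out = is_pattern_contained_in_grid_ori_alt grid pattern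
instance (grid : List (List Int)) (pattern : List Int) (out : Bool) : Decidable (Spec_is_pattern_contained_in_grid_ori grid pattern out) := by unfold Spec_is_pattern_contained_in_grid_ori; infer_instance

-- ===== CLAIM (what is proved, stated in full; the proofs are below) =====
def Claim_equal_is_pattern_contained_in_grid_ori : Prop := ∀ (grid : List (List Int)) (pattern : List Int), Dom_is_pattern_contained_in_grid_ori grid pattern → Spec_is_pattern_contained_in_grid_ori grid pattern (is_pattern_contained_in_grid_ori grid pattern)

-- ===== LEMMAS AND PROOFS =====

-- membership in the comprehension set = in-bounds cell whose value satisfies cond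
lemma contains_pvCellsIf (grid : List (List Int)) (cond : Int → Int → Int → Bool) (x y : Int) :
    (pvCellsIf grid cond).contains (x, y) = (pvInb grid x y && cond x y (pvCell grid x y)) := by
  rw [Bool.eq_iff_iff, PySem.Set.contains_iff]
  simp only [pvCellsIf, PySem.Set.mem_ofList, List.mem_flatMap, List.mem_filterMap,
    PySem.List.mem_enumerate_iff, Option.ite_none_right_eq_some, Option.some.injEq,
    pvInb, pvCell, Bool.and_eq_true, decide_eq_true_eq, zero_add]
  constructor
  · rintro ⟨ir, ⟨k, hk, rfl⟩, jv, ⟨m, hm, rfl⟩, hc, hxy⟩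
    dsimp only at hm hc hxy ⊢
    obtain ⟨rfl, rfl⟩ := Prod.mk.injEq .. ▸ hxy
    have h1 : PySem.List.pyGetD grid (k : Int) [] = grid[k] := by
      simp [PySem.List.pyGetD_natCast, List.getElem?_eq_getElem hk]
    have h2 : PySem.List.pyGetD grid[k] (m : Int) 0 = grid[k][m] := by
      simp [PySem.List.pyGetD_natCast, List.getElem?_eq_getElem hm]
    refine ⟨⟨⟨⟨by positivity, by exact_mod_cast hk⟩, by positivity⟩, ?_⟩, ?_⟩
    · rw [h1]; exact_mod_cast hm
    · rw [h1, h2]; exact hc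
  · rintro ⟨⟨⟨⟨hx0, hxl⟩, hy0⟩, hyl⟩, hc⟩
    rw [PySem.List.pyGetD_eq_getElem _ _ hx0 hxl] at hyl hc
    have hxn : x.toNat < grid.length := by omega
    have hyn : y.toNat < grid[x.toNat].length := by omega
    rw [PySem.List.pyGetD_eq_getElem _ _ hy0 (by exact_mod_cast hyl)] at hc
    exact ⟨(x, grid[x.toNat]), ⟨x.toNat, hxn, by simp [Int.toNat_of_nonneg hx0]⟩,
      (y, grid[x.toNat][y.toNat]), ⟨y.toNat, hyn, by simp [Int.toNat_of_nonneg hy0]⟩, hc,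
      rfl⟩

-- if a longer suffix is realizable somewhere, the shorter suffix is realizable somewhere
lemma pvDfs_append_exists (grid : List (List Int)) (s : List Int) :
    ∀ (t : List Int) (x y : Int), pvDfs grid x y (t ++ s) = true →
      ∃ c : Int × Int, pvDfs grid c.1 c.2 s = true := by
  intro t
  induction t with
  | nil => intro x y h; exact ⟨(x, y), h⟩
  | cons p t ih =>
    intro x y h
    rw [List.cons_append, pvDfs] at h
    split at h
    · rcases Bool.or_eq_true_iff.mp h with h | h4
      · rcases Bool.or_eq_true_iff.mp h with h | h3
        · rcases Bool.or_eq_true_iff.mp h with h1 | h2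
          · exact ih _ _ h1
          · exact ih _ _ h2
        · exact ih _ _ h3
      · exact ih _ _ h4
    · exact absurd h (by simp)

-- loop invariant: the frontier holds exactly the cells where suffix s can start
lemma pvLoop_correct (grid : List (List Int)) :
    ∀ (rest : List Int) (F : PySem.Set (Int × Int)) (s : List Int), s ≠ [] →
      (∀ x y : Int, F.contains (x, y) = pvDfs grid x y s) →
      (pvLoop grid F rest = true ↔ ∃ c : Int × Int, pvDfs grid c.1 c.2 (rest.reverse ++ s) = true) := by
  intro rest
  induction rest with
  | nil =>
    intro F s hs hF
    simp only [pvLoop, List.reverse_nil, List.nil_append, decide_eq_true_eq]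
    constructor
    · intro hlen
      obtain ⟨c, hc⟩ := List.exists_mem_of_length_pos hlen
      exact ⟨c, by rw [← hF c.1 c.2]; exact (PySem.Set.contains_iff F c).mpr hc⟩
    · rintro ⟨⟨x, y⟩, hc⟩
      have : (x, y) ∈ F := (PySem.Set.contains_iff F (x, y)).mp (by rw [hF x y]; exact hc)
      exact List.length_pos_of_mem this
  | cons ch rest ih =>
    intro F s hs hF
    rw [pvLoop]
    by_cases hE : F.isEmpty
    · simp only [hE, if_true]
      constructor
      · intro h; exact absurd h (by simp)
      · rintro ⟨c, hc⟩
        have heq : (ch :: rest).reverse ++ s = (rest.reverse ++ [ch]) ++ s := by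
          simp
        rw [heq] at hc
        obtain ⟨c', hc'⟩ := pvDfs_append_exists grid s _ c.1 c.2 hc
        have : F.contains (c'.1, c'.2) = true := by rw [hF]; exact hc'
        rw [List.isEmpty_iff.mp hE] at this
        simp at this
    · simp only [hE, if_false, Bool.false_eq_true]
      have hF' : ∀ x y : Int,
          (pvCellsIf grid (fun i j v => (v == ch) && pvNbr F i j)).contains (x, y) =
            pvDfs grid x y (ch :: s) := by
        intro x y
        rw [contains_pvCellsIf, pvDfs]
        have hnbr : pvNbr F x y =
            (pvDfs grid (x - 1) y s || pvDfs grid (x + 1) y s ||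
              pvDfs grid x (y - 1) s || pvDfs grid x (y + 1) s) := by
          rw [pvNbr, hF, hF, hF, hF]
        rw [hnbr]
        cases h1 : pvInb grid x y <;> cases h2 : (pvCell grid x y == ch) <;> simp
      rw [ih _ (ch :: s) (by simp) hF']
      constructor
      · rintro ⟨c, hc⟩
        exact ⟨c, by rw [show (ch :: rest).reverse ++ s = rest.reverse ++ (ch :: s) by simp]; exact hc⟩
      · rintro ⟨c, hc⟩
        exact ⟨c, by rw [show rest.reverse ++ (ch :: s) = (ch :: rest).reverse ++ s by simp]; exact hc⟩

-- a successful DFS on a nonempty suffix starts at an in-bounds cell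
lemma pvDfs_inb (grid : List (List Int)) (x y p : Int) (rest : List Int)
    (h : pvDfs grid x y (p :: rest) = true) : pvInb grid x y = true := by
  rw [pvDfs] at h
  split at h
  · next hg => exact (Bool.and_eq_true_iff.mp hg).1
  · cases h

-- A's double any over all cells = existence of a successful DFS start (nonempty pattern)
lemma ori_exists (grid : List (List Int)) (p : Int) (ps : List Int) :
    is_pattern_contained_in_grid_ori grid (p :: ps) = true ↔
      ∃ c : Int × Int, pvDfs grid c.1 c.2 (p :: ps) = true := by
  simp only [is_pattern_contained_in_grid_ori, List.any_eq_true, PySem.List.mem_pyRange_one]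
  constructor
  · rintro ⟨i, _, j, _, h⟩; exact ⟨(i, j), h⟩
  · rintro ⟨⟨x, y⟩, h⟩
    have hb := pvDfs_inb grid x y p ps h
    simp only [pvInb, Bool.and_eq_true, decide_eq_true_eq] at hb
    obtain ⟨⟨⟨hx0, hxl⟩, hy0⟩, hyl⟩ := hb
    exact ⟨x, ⟨hx0, hxl⟩, y, ⟨hy0, hyl⟩, h⟩

lemma ports_eq (grid : List (List Int)) (pattern : List Int) :
    is_pattern_contained_in_grid_ori grid pattern = is_pattern_contained_in_grid_ori_alt grid pattern := by
  cases pattern with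
  | nil =>
    rw [Bool.eq_iff_iff]
    simp only [is_pattern_contained_in_grid_ori, is_pattern_contained_in_grid_ori_alt,
      List.reverse_nil, List.any_eq_true, PySem.List.mem_pyRange_one, pvDfs,
      decide_eq_true_eq]
    constructor
    · rintro ⟨i, ⟨hi0, hil⟩, j, ⟨hj0, hjl⟩, -⟩
      refine ⟨PySem.List.pyGetD grid i [], ?_, by omega⟩
      rw [PySem.List.pyGetD_eq_getElem _ _ hi0 hil]
      exact List.getElem_mem _
    · rintro ⟨row, hrow, hlen⟩
      obtain ⟨k, hk, rfl⟩ := List.getElem_of_mem hrow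
      refine ⟨(k : Int), ⟨by positivity, by exact_mod_cast hk⟩, 0, ⟨le_refl _, ?_⟩, trivial⟩
      have : PySem.List.pyGetD grid (k : Int) [] = grid[k] := by
        simp [PySem.List.pyGetD_natCast, List.getElem?_eq_getElem hk]
      rw [this]; exact_mod_cast hlen
  | cons p ps =>
    cases hrev : (p :: ps).reverse with
    | nil => simp at hrev
    | cons ch rest =>
      have hpat : p :: ps = rest.reverse ++ [ch] := by
        have := congrArg List.reverse hrev
        simpa using this
      have hF0 : ∀ x y : Int,
          (pvCellsIf grid (fun _ _ v => v == ch)).contains (x, y) = pvDfs grid x y [ch] := by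
        intro x y
        rw [contains_pvCellsIf, pvDfs]
        cases h1 : pvInb grid x y <;> cases h2 : (pvCell grid x y == ch) <;> simp [pvDfs]
      rw [Bool.eq_iff_iff, ori_exists]
      simp only [is_pattern_contained_in_grid_ori_alt, hrev]
      rw [pvLoop_correct grid rest _ [ch] (by simp) hF0]
      constructor
      · rintro ⟨c, hc⟩; exact ⟨c, by rw [← hpat]; exact hc⟩
      · rintro ⟨c, hc⟩; exact ⟨c, by rw [hpat]; exact hc⟩

-- ===== VERDICT (by name: the statement is the Claim_ definition above) =====
theorem is_pattern_contained_in_grid_ori_spec : Claim_equal_is_pattern_contained_in_grid_ori := by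
  intro grid pattern _
  unfold Spec_is_pattern_contained_in_grid_ori
  exact ports_eq grid pattern
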